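-- pv_equiv track=rewrite | github.com/MHudomalj/CAMP | CAMP_app.py | str_overlap
-- ===== SOURCE A (Python) =====
-- def str_overlap(old, new):
--     new_segments = new.lower().split()
--     old_segments = old.lower().split()
--     max_overlap = min(len(new_segments), len(old_segments))
--     overlap = 0
--     for i in range(1, max_overlap+1):
--         tmp = 0
--         for j in range(0, i):
--             if old_segments[-i+j] == new_segments[j]:
--                 tmp += 1
--         if tmp >= overlap:
--             overlap = i
--     return overlap
-- ===== SOURCE B (Python) =====
-- def str_overlap(old, new):
--     new_segments = new.lower().split()
--     old_segments = old.lower().split()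
--     n_old = len(old_segments)
--     max_overlap = min(len(new_segments), n_old)
--     positions = {}
--     for b, token in enumerate(new_segments):
--         positions.setdefault(token, []).append(b)
--     counts = {}
--     for a, token in enumerate(old_segments):
--         for b in positions.get(token, []):
--             offset = n_old - a + b
--             counts[offset] = counts.get(offset, 0) + 1
--     overlap = 0
--     for i in range(1, max_overlap + 1):
--         if counts.get(i, 0) >= overlap:
--             overlap = i
--     return overlap
-- ===== Notes on version B (the rewrite author's own statement) =====
-- stated objective: alternative
-- what changed: Replaces A's nested per-prefix rescan (compare the last i old tokens with the first i new tokens for every i) by a histogram pass: a token-to-indices dict over new_segments, a dict counting equal-token pairs per diagonal offset, then the same sequential >=-update scan over 1..max_overlap.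
import Mathlib
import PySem

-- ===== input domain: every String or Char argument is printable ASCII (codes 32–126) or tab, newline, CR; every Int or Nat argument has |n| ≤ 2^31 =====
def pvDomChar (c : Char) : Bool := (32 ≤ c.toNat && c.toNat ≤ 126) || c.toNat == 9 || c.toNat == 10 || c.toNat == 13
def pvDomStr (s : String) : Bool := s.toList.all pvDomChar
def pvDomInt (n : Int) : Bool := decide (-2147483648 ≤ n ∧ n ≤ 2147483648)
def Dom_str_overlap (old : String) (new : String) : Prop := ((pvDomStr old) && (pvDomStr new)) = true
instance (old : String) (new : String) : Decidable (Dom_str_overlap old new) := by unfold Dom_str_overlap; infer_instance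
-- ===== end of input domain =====

-- B replaces A's nested per-prefix rescan by a histogram pass: a token→indices map over
-- new_segments, a dict counting equal-token pairs per diagonal offset, then the same sequential >=-update scan.

-- ===== PORT A =====
def str_overlap (old : String) (new : String) : Int :=
  let new_segments := PySem.Str.split₀ (PySem.Str.lower new)
  let old_segments := PySem.Str.split₀ (PySem.Str.lower old)
  let max_overlap : Int := min (new_segments.length : Int) (old_segments.length : Int)
  (PySem.List.pyRange 1 (max_overlap + 1) 1).foldl
    (fun overlap i =>
      let tmp := (PySem.List.pyRange 0 i 1).foldl
        (fun tmp j =>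
          -- indices -i+j and j are always in range here (0 ≤ j < i ≤ min of the lengths)
          if PySem.List.pyGet? old_segments (-i + j) == PySem.List.pyGet? new_segments j
          then tmp + 1 else tmp) (0 : Int)
      if tmp ≥ overlap then i else overlap) 0

-- ===== PORT B =====
def str_overlap_alt (old : String) (new : String) : Int :=
  let new_segments := PySem.Str.split₀ (PySem.Str.lower new)
  let old_segments := PySem.Str.split₀ (PySem.Str.lower old)
  let n_old : Int := old_segments.length
  let max_overlap : Int := min (new_segments.length : Int) n_old
  let positions : PySem.Dict String (List Int) :=
    (PySem.List.enumerate new_segments).foldl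
      (fun d p => d.modify p.2 [] (· ++ [p.1])) PySem.Dict.empty
  let counts : PySem.Dict Int Int :=
    (PySem.List.enumerate old_segments).foldl
      (fun d p => (positions.getD p.2 []).foldl
        (fun d b => d.insert (n_old - p.1 + b) (d.getD (n_old - p.1 + b) 0 + 1)) d)
      PySem.Dict.empty
  (PySem.List.pyRange 1 (max_overlap + 1) 1).foldl
    (fun overlap i => if counts.getD i 0 ≥ overlap then i else overlap) 0

-- ===== PRECONDITION & SPEC =====
def Spec_str_overlap (old : String) (new : String) (out : Int) : Prop := out = str_overlap_alt old new
instance (old : String) (new : String) (out : Int) : Decidable (Spec_str_overlap old new out) := by unfold Spec_str_overlap; infer_instance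

-- ===== CLAIM (what is proved, stated in full; the proofs are below) =====
def Claim_equal_str_overlap : Prop := ∀ (old : String) (new : String), Dom_str_overlap old new → Spec_str_overlap old new (str_overlap old new)

-- ===== LEMMAS AND PROOFS =====

theorem pv_positions_getD (N : List String) (t : String) :
    ((PySem.List.enumerate N).foldl (fun d p => d.modify p.2 [] (· ++ [p.1]))
        (PySem.Dict.empty : PySem.Dict String (List Int))).getD t []
    = (((PySem.List.enumerate N).filter (fun p => p.2 == t)).map (·.1)) := by
  have h : (PySem.List.enumerate N).foldl (fun d p => d.modify p.2 [] (· ++ [p.1]))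
      (PySem.Dict.empty : PySem.Dict String (List Int))
      = ((PySem.List.enumerate N).map (fun p => (p.2, p.1))).foldl
        (fun d q => d.modify q.1 [] (· ++ [q.2])) PySem.Dict.empty :=
    (List.foldl_map (f := fun p : Int × String => (p.2, p.1))
      (g := fun (d : PySem.Dict String (List Int)) q => d.modify q.1 [] (· ++ [q.2]))).symm
  rw [h, PySem.Dict.getD_foldl_modify_append]
  simp [List.filter_map, List.map_map, Function.comp_def]

theorem pv_insert_count {α : Type} (xs : List α) (k : α → Int) (d : PySem.Dict Int Int) (v : Int) :
    (xs.foldl (fun d b => d.insert (k b) (d.getD (k b) 0 + 1)) d).getD v 0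
    = d.getD v 0 + (List.countP (fun b => k b == v) xs : Int) := by
  have h : xs.foldl (fun d b => d.insert (k b) (d.getD (k b) 0 + 1)) d
      = (xs.map k).foldl (fun d x => d.insert x (d.getD x 0 + 1)) d :=
    (List.foldl_map (f := k)
      (g := fun (d : PySem.Dict Int Int) x => d.insert x (d.getD x 0 + 1))).symm
  rw [h, PySem.Dict.getD_foldl_insert_add_one]
  congr 1
  norm_cast
  simp [List.count_eq_countP, List.countP_map, Function.comp_def]

theorem pv_nested_count (l : List (Int × String)) (P : String → List Int) (LI : Int)
    (d : PySem.Dict Int Int) (v : Int) :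
    (l.foldl (fun d p => (P p.2).foldl
        (fun d b => d.insert (LI - p.1 + b) (d.getD (LI - p.1 + b) 0 + 1)) d) d).getD v 0
    = d.getD v 0 + (l.map (fun p => (List.countP (fun b => LI - p.1 + b == v) (P p.2) : Int))).sum := by
  induction l generalizing d with
  | nil => simp
  | cons p l ih =>
    simp only [List.foldl_cons, List.map_cons, List.sum_cons]
    rw [ih, pv_insert_count]
    ring

theorem pv_countP_range_pin (n : Nat) (p : Nat → Bool) (m0 : Nat) (h : ∀ m, p m = true → m = m0) :
    List.countP p (List.range n) = if m0 < n ∧ p m0 = true then 1 else 0 := by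
  induction n with
  | zero => simp
  | succ n ih =>
    rw [List.range_succ, List.countP_append, ih, List.countP_singleton]
    by_cases hp : p n = true
    · have hn := h n hp
      subst hn
      split_ifs with h1 h2 <;> simp_all
    · have hm0 : p m0 = true → m0 ≠ n := fun e hne => hp (hne ▸ e)
      split_ifs with h1 h2 h2 <;> simp_all <;> omega

theorem pv_countP_pyRange_pin (a b j0 : Int) (p : Int → Bool) (h : ∀ j, p j = true → j = j0) :
    List.countP p (PySem.List.pyRange a b 1) = if a ≤ j0 ∧ j0 < b ∧ p j0 = true then 1 else 0 := by
  rw [PySem.List.pyRange_one, List.countP_map]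
  by_cases ha : a ≤ j0
  · have hrep : a + ((j0 - a).toNat : Int) = j0 := by omega
    rw [pv_countP_range_pin _ _ (j0 - a).toNat
      (fun m hm => by have h2 : a + (m:Int) = j0 := h _ hm; omega)]
    simp only [Function.comp_def]
    have hpj : p (a + ((j0 - a).toNat : Int)) = p j0 := by rw [hrep]
    split_ifs with h1 h2 h2
    · rfl
    · exfalso; apply h2; exact ⟨ha, by omega, by rw [← hpj]; exact h1.2⟩
    · exfalso; apply h1; exact ⟨by omega, by rw [hpj]; exact h2.2.2⟩
    · rfl
  · have hz : List.countP (p ∘ fun k : Nat => a + ↑k) (List.range (b - a).toNat) = 0 := by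
      rw [List.countP_eq_zero]
      intro m _
      simp only [Function.comp]
      intro hm
      have := h _ hm
      omega
    rw [hz]
    split_ifs with h1
    · exact absurd h1.1 ha
    · rfl

theorem pv_diag_count (O N : List String) (i : Int) (h1 : 1 ≤ i)
    (h2 : i ≤ min (N.length : Int) (O.length : Int)) :
    ((PySem.List.enumerate O).map (fun p =>
        (List.countP (fun b => (O.length : Int) - p.1 + b == i)
          (((PySem.List.enumerate N).filter (fun q => q.2 == p.2)).map (·.1)) : Int))).sum
    = (List.countP (fun j => PySem.List.pyGet? O (-i + j) == PySem.List.pyGet? N j)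
        (PySem.List.pyRange 0 i 1) : Int) := by
  have hiN : i ≤ (N.length : Int) := le_trans h2 (min_le_left _ _)
  have hiO : i ≤ (O.length : Int) := le_trans h2 (min_le_right _ _)
  set LI : Int := (O.length : Int) with hLI
  -- Step 1: evaluate each inner count as a 0/1 indicator
  have step1 : ∀ p : Int × String,
      (List.countP (fun b => LI - p.1 + b == i)
        (((PySem.List.enumerate N).filter (fun q => q.2 == p.2)).map (·.1)) : Int)
      = if 0 ≤ i - LI + p.1 ∧ i - LI + p.1 < (N.length : Int) ∧
          (PySem.List.pyGetD N (i - LI + p.1) "" == p.2) = true then 1 else 0 := by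
    intro p
    rw [List.countP_map, List.countP_filter, PySem.List.enumerate_eq_map_pyRange N "",
      List.countP_map]
    rw [pv_countP_pyRange_pin 0 (PySem.List.len N) (i - LI + p.1) _
      (fun j hj => by
        have h3 : (LI - p.1 + j == i) = true := by
          simp only [Function.comp_def, Bool.and_eq_true] at hj
          exact hj.1
        have h4 : LI - p.1 + j = i := by simpa using h3
        omega)]
    have hlen : PySem.List.len N = (N.length : Int) := by simp [PySem.List.len]
    simp only [Function.comp_def, hlen]
    have hkey : (LI - p.1 + (i - LI + p.1) == i) = true := by simp only [beq_iff_eq]; omega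
    simp only [hkey, Bool.true_and, Nat.cast_ite, Nat.cast_one, Nat.cast_zero]
  rw [List.map_congr_left (fun p _ => step1 p)]
  -- Step 2: the outer sum over enumerate O as a sum over pyRange 0 LI 1
  rw [PySem.List.enumerate_eq_map_pyRange O "", List.map_map]
  have hlenO : PySem.List.len O = LI := by simp [PySem.List.len, hLI]
  rw [hlenO]
  -- Step 3: split the range at LI - i; the low part contributes 0
  rw [PySem.List.pyRange_one_append 0 (LI - i) LI (by omega) (by omega),
    List.map_append, List.sum_append]
  have hlow : ((PySem.List.pyRange 0 (LI - i) 1).map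
      ((fun p : Int × String => if 0 ≤ i - LI + p.1 ∧ i - LI + p.1 < (N.length : Int) ∧
          (PySem.List.pyGetD N (i - LI + p.1) "" == p.2) = true then (1:Int) else 0) ∘
        (fun j => (j, PySem.List.pyGetD O j "")))).sum = 0 := by
    apply List.sum_eq_zero
    intro x hx
    rcases List.mem_map.mp hx with ⟨j, hj, rfl⟩
    have hjr := (PySem.List.mem_pyRange_one).mp hj
    simp only [Function.comp_def]
    rw [if_neg]
    omega
  rw [hlow, zero_add]
  -- Step 4: reindex the high part and compare with the RHS termwise
  rw [PySem.List.pyRange_one (LI - i) LI, PySem.List.pyRange_one 0 i,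
    List.countP_map, List.map_map]
  have hto : (LI - (LI - i)).toNat = i.toNat := by omega
  have h00 : (i - 0).toNat = i.toNat := by omega
  rw [hto, h00]
  rw [show ((List.countP ((fun j => PySem.List.pyGet? O (-i + j) == PySem.List.pyGet? N j) ∘
      (fun k : Nat => 0 + (k : Int))) (List.range i.toNat)) : Int)
    = ((List.range i.toNat).map (fun k : Nat =>
        if ((fun j => PySem.List.pyGet? O (-i + j) == PySem.List.pyGet? N j) ∘
          (fun k : Nat => 0 + (k : Int))) k = true then (1:Int) else 0)).sum from
    (PySem.List.sum_map_ite_one_zero _ _).symm]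
  congr 1
  apply List.map_congr_left
  intro k hk
  have hki : k < i.toNat := List.mem_range.mp hk
  have hkN : k < N.length := by omega
  have hOlen : 0 < O.length := by omega
  have hiONat : i.toNat ≤ O.length := by omega
  simp only [Function.comp_def, zero_add]
  -- indices as naturals
  have hidx : i - LI + (LI - i + (k : Int)) = (k : Int) := by ring
  have hnat : LI - i + (k : Int) = ((O.length - i.toNat + k : Nat) : Int) := by
    have h5 : i.toNat ≤ O.length := by omega
    push_cast [h5]
    omega
  have hinr : O.length - i.toNat + k < O.length := by omega
  have hgN : PySem.List.pyGetD N ((k : Nat) : Int) "" = N[k] := by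
    rw [PySem.List.pyGetD_natCast]
    exact List.getD_eq_getElem _ _ hkN
  have hgO : PySem.List.pyGetD O (LI - i + (k : Int)) "" = O[O.length - i.toNat + k] := by
    rw [hnat, PySem.List.pyGetD_natCast]
    exact List.getD_eq_getElem _ _ hinr
  have hK : (-i + (k : Int)) = -(((i.toNat - k : Nat) : Int)) := by omega
  have hgetO : PySem.List.pyGet? O (-i + (k : Int)) = some O[O.length - i.toNat + k] := by
    rw [hK, PySem.List.pyGet?_neg_natCast O (i.toNat - k) (by omega) (by omega)]
    rw [show O.length - (i.toNat - k) = O.length - i.toNat + k from by omega]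
    exact List.getElem?_eq_getElem hinr
  have hgetN : PySem.List.pyGet? N ((k : Nat) : Int) = some N[k] := by
    rw [PySem.List.pyGet?_natCast]
    exact List.getElem?_eq_getElem hkN
  rw [hidx, hgN, hgO, hgetO, hgetN]
  have hkN' : ((k : Int)) < (N.length : Int) := by omega
  have hOcond : ((some O[O.length - i.toNat + k] == some N[k]) = true) ↔
      O[O.length - i.toNat + k] = N[k] := by simp
  by_cases he : N[k] = O[O.length - i.toNat + k]
  · rw [if_pos ⟨by omega, hkN', by simp [he]⟩, if_pos (hOcond.mpr he.symm)]
  · rw [if_neg (fun hc => he (by simpa using hc.2.2)),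
      if_neg (fun hc => he (hOcond.mp hc).symm)]

-- helper names for B's two dicts (proof-side only)
def pvPos (N : List String) : PySem.Dict String (List Int) :=
  (PySem.List.enumerate N).foldl (fun d p => d.modify p.2 [] (· ++ [p.1])) PySem.Dict.empty

def pvCounts (O N : List String) : PySem.Dict Int Int :=
  (PySem.List.enumerate O).foldl
    (fun d p => ((pvPos N).getD p.2 []).foldl
      (fun d b => d.insert ((O.length : Int) - p.1 + b)
        (d.getD ((O.length : Int) - p.1 + b) 0 + 1)) d)
    PySem.Dict.empty

-- B's histogram read at i = A's inner match count for prefix length i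
theorem pv_counts_getD (O N : List String) (i : Int) (h1 : 1 ≤ i)
    (h2 : i ≤ min (N.length : Int) (O.length : Int)) :
    (pvCounts O N).getD i 0
    = (List.countP (fun j => PySem.List.pyGet? O (-i + j) == PySem.List.pyGet? N j)
        (PySem.List.pyRange 0 i 1) : Int) := by
  unfold pvCounts
  rw [pv_nested_count _ (fun t => (pvPos N).getD t []) _ _ _,
    PySem.Dict.getD_empty, zero_add, ← pv_diag_count O N i h1 h2]
  congr 1
  apply List.map_congr_left
  intro p _
  have hp : (pvPos N).getD p.2 []
      = (((PySem.List.enumerate N).filter (fun q => q.2 == p.2)).map (·.1)) := by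
    unfold pvPos
    exact pv_positions_getD N p.2
  rw [hp]

-- the core equality on segment lists
theorem pv_core (O N : List String) :
    (PySem.List.pyRange 1 (min (N.length : Int) (O.length : Int) + 1) 1).foldl
      (fun overlap i =>
        let tmp := (PySem.List.pyRange 0 i 1).foldl
          (fun tmp j =>
            if PySem.List.pyGet? O (-i + j) == PySem.List.pyGet? N j
            then tmp + 1 else tmp) (0 : Int)
        if tmp ≥ overlap then i else overlap) 0
    = (PySem.List.pyRange 1 (min (N.length : Int) (O.length : Int) + 1) 1).foldl
      (fun overlap i => if (pvCounts O N).getD i 0 ≥ overlap then i else overlap) 0 := by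
  apply PySem.List.foldl_congr_mem
  intro acc x hx
  have hx' := (PySem.List.mem_pyRange_one).mp hx
  have h2 : x ≤ min (N.length : Int) (O.length : Int) := by omega
  simp only [PySem.List.foldl_count_if, zero_add, pv_counts_getD O N x hx'.1 h2]

-- ===== VERDICT (by name: the statement is the Claim_ definition above) =====
theorem str_overlap_spec : Claim_equal_str_overlap := by
  intro old new _
  unfold Spec_str_overlap str_overlap str_overlap_alt
  exact pv_core (PySem.Str.split₀ (PySem.Str.lower old)) (PySem.Str.split₀ (PySem.Str.lower new))
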